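-- pv_equiv track=rewrite | github.com/johanna-rock/quantization_analysis | hf_model_utils.py | resolve_format_list
-- ===== SOURCE A (Python) =====
-- from typing import Optional
--
-- def resolve_format_list(values: Optional[list[str]], supported: list[str]) -> list[str]:
--     if not values:
--         return supported
--     seen = set()
--     out: list[str] = []
--     for raw in values:
--         v = raw.strip().lower()
--         if v == "all":
--             for s in supported:
--                 if s not in seen:
--                     seen.add(s)
--                     out.append(s)
--             continue
--         if v not in supported:
--             raise ValueError(f"Unsupported format '{raw}'. Supported: {', '.join(supported)}, all")
--         if v not in seen:
--             seen.add(v)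
--             out.append(v)
--     return out
-- ===== SOURCE B (Python) =====
-- def resolve_format_list(values, supported):
--     if not values:
--         return supported
--     norm = [raw.strip().lower() for raw in values]
--     for raw, v in zip(values, norm):
--         if v != "all" and v not in supported:
--             raise ValueError(f"Unsupported format '{raw}'. Supported: {', '.join(supported)}, all")
--     expanded = [s for v in norm for s in (supported if v == "all" else [v])]
--     return sorted(set(expanded), key=expanded.index)
-- ===== Notes on version B (the rewrite author's own statement) =====
-- stated objective: alternative
-- what changed: Replaces A's single stateful loop (seen-set + out list, validating, expanding and deduping per element) with four stateless staged passes: normalize by comprehension, validate by a zip scan, flatten by a nested comprehension, then order the distinct elements by sorting set(expanded) by first-occurrence index.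
import Mathlib
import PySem

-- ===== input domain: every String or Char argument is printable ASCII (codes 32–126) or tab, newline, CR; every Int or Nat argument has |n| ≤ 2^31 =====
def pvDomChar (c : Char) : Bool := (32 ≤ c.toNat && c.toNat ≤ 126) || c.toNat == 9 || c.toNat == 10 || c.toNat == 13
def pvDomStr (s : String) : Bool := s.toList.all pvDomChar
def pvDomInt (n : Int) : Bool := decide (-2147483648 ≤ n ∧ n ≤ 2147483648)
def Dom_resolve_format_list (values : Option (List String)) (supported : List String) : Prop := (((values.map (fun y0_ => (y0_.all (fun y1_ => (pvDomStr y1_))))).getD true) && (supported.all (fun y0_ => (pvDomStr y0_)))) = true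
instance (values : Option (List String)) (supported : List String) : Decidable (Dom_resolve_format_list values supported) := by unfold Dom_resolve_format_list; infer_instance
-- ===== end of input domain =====

-- B replaces A's single stateful validate/expand/dedup loop by staged stateless passes
-- (normalize, validate, flatten, then sort the distinct elements by first-occurrence index);
-- objective: alternative (same cost).

-- ===== PORT A =====
-- A raises ValueError on unsupported entries; those inputs are excluded by Pre_ below
-- (the port returns [] there, an unreached default).
def pvNorm (raw : String) : String := PySem.Str.lower (PySem.Str.strip raw)

def loopA (supported : List String) :
    List String → PySem.Set String × List String → Option (PySem.Set String × List String)
  | [], st => some st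
  | raw :: rest, st =>
    let v := pvNorm raw
    if v = "all" then
      loopA supported rest
        (supported.foldl
          (fun (p : PySem.Set String × List String) s =>
            if PySem.Set.contains p.1 s then p else (p.1 ++ [s], p.2 ++ [s])) st)
    else if v ∈ supported then
      (if PySem.Set.contains st.1 v then loopA supported rest st
       else loopA supported rest (st.1 ++ [v], st.2 ++ [v]))
    else none

def resolve_format_list (values : Option (List String)) (supported : List String) : List String :=
  match values with
  | none => supported
  | some vs =>
    if vs = [] then supported
    else
      match loopA supported vs (PySem.Set.empty, []) with
      | some (_, out) => out
      | none => []

-- ===== PORT B =====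
-- staged passes of Source B: norm = map, a validation scan over zip(values, norm) (Python raises
-- ValueError at the first invalid pair; the port returns [] there, unreached under Pre_),
-- expanded = flatten comprehension, then sorted(set(expanded), key=expanded.index)
-- (key is injective on the set: first-occurrence indices of distinct elements are distinct).
def resolve_format_list_alt (values : Option (List String)) (supported : List String) : List String :=
  match values with
  | none => supported
  | some vs =>
    if vs = [] then supported
    else
      let norm := vs.map pvNorm
      if (vs.zip norm).all (fun p => p.2 == "all" || decide (p.2 ∈ supported)) then
        let expanded := norm.flatMap (fun v => if v = "all" then supported else [v])
        PySem.List.sorted (PySem.Set.ofList expanded)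
          (fun x => (PySem.List.index? expanded x).getD 0) false
      else []

-- ===== PRECONDITION & SPEC =====
-- Pre_ excludes exactly the inputs on which A raises ValueError (an entry whose
-- stripped/lowered form is neither "all" nor a supported format); B raises there too.
def Pre_resolve_format_list (values : Option (List String)) (supported : List String) : Prop :=
  ∀ raw ∈ values.getD [], pvNorm raw = "all" ∨ pvNorm raw ∈ supported
instance (values : Option (List String)) (supported : List String) : Decidable (Pre_resolve_format_list values supported) := by unfold Pre_resolve_format_list; infer_instance

def pvWitness_resolve_format_list : Option (List String) × List String :=
  (some [" A ", "all", "b"], ["a", "b"])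

def Spec_resolve_format_list (values : Option (List String)) (supported : List String) (out : List String) : Prop := out = resolve_format_list_alt values supported
instance (values : Option (List String)) (supported : List String) (out : List String) : Decidable (Spec_resolve_format_list values supported out) := by unfold Spec_resolve_format_list; infer_instance

-- ===== CLAIM (what is proved, stated in full; the proofs are below) =====
def Claim_equal_resolve_format_list : Prop := ∀ (values : Option (List String)) (supported : List String), Dom_resolve_format_list values supported → Pre_resolve_format_list values supported → Spec_resolve_format_list values supported (resolve_format_list values supported)

-- ===== LEMMAS AND PROOFS =====
-- the flat expanded sequence both programs deduplicate
def flatE (supported : List String) : List String → List String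
  | [] => []
  | raw :: rest =>
    (if pvNorm raw = "all" then supported else [pvNorm raw]) ++ flatE supported rest

theorem flatMap_eq_flatE (supported vs : List String) :
    (vs.map pvNorm).flatMap (fun v => if v = "all" then supported else [v])
      = flatE supported vs := by
  induction vs with
  | nil => simp [flatE]
  | cons raw rest ih => simp [flatE, ih]

theorem zip_all_valid (supported : List String) (vs : List String)
    (h : ∀ raw ∈ vs, pvNorm raw = "all" ∨ pvNorm raw ∈ supported) :
    (vs.zip (vs.map pvNorm)).all (fun p => p.2 == "all" || decide (p.2 ∈ supported)) = true := by
  induction vs with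
  | nil => simp
  | cons raw rest ih =>
    have hr := h raw (by simp)
    have hrest : ∀ r ∈ rest, pvNorm r = "all" ∨ pvNorm r ∈ supported :=
      fun r hm => h r (by simp [hm])
    rcases hr with hr | hr <;> simp [hr, ih hrest]

-- along set(expanded) (first-occurrence order) the first-occurrence indices strictly increase
theorem pairwise_idx (e : List String) :
    (PySem.Set.ofList e).Pairwise
      (fun a b => (PySem.List.index? e a).getD 0 < (PySem.List.index? e b).getD 0) := by
  induction e using List.reverseRecOn with
  | nil => simp [PySem.Set.ofList]
  | append_singleton e x ih =>
    rw [PySem.Set.ofList_append_singleton]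
    by_cases hx : x ∈ e
    · rw [PySem.Set.add_of_mem (by simpa [PySem.Set.mem_ofList] using hx)]
      refine ih.imp_of_mem ?_
      intro a b ha hb h
      have ha' : a ∈ e := (PySem.Set.mem_ofList _ _).1 ha
      have hb' : b ∈ e := (PySem.Set.mem_ofList _ _).1 hb
      rwa [PySem.List.index?_append_of_mem _ ha', PySem.List.index?_append_of_mem _ hb']
    · rw [PySem.Set.add_of_not_mem (by simpa [PySem.Set.mem_ofList] using hx)]
      rw [List.pairwise_append]
      refine ⟨ih.imp_of_mem ?_, by simp, ?_⟩
      · intro a b ha hb h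
        have ha' : a ∈ e := (PySem.Set.mem_ofList _ _).1 ha
        have hb' : b ∈ e := (PySem.Set.mem_ofList _ _).1 hb
        rwa [PySem.List.index?_append_of_mem _ ha', PySem.List.index?_append_of_mem _ hb']
      · intro a ha b hb
        have hb' : b = x := by simpa using hb
        subst hb'
        have ha' : a ∈ e := (PySem.Set.mem_ofList _ _).1 ha
        rw [PySem.List.index?_append_of_mem _ ha',
            PySem.List.index?_append_singleton_self _ _ hx]
        obtain ⟨k, hk⟩ := Option.isSome_iff_exists.1 (((PySem.List.index?_isSome_iff _ _).2) ha')
        obtain ⟨hlt, -, -⟩ := PySem.List.getElem_of_index?_eq_some hk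
        simp only [hk, Option.getD_some]
        exact hlt

-- sorting set(e) by e.index leaves it in first-occurrence order
theorem sorted_idx_ofList (e : List String) :
    PySem.List.sorted (PySem.Set.ofList e)
      (fun x => (PySem.List.index? e x).getD 0) false = PySem.Set.ofList e :=
  PySem.List.sorted_eq_self_of_pairwise _ _
    ((pairwise_idx e).imp (fun h => Nat.le_of_lt h))

-- the ∈-form is the simp-normal form of the port's contains test
theorem foldl_all_pair (supported : List String) (s : PySem.Set String) :
    supported.foldl
      (fun (p : PySem.Set String × List String) x =>
        if x ∈ p.1 then p else (p.1 ++ [x], p.2 ++ [x])) (s, s)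
      = (PySem.Set.update s supported, PySem.Set.update s supported) := by
  induction supported generalizing s with
  | nil => simp [PySem.Set.update]
  | cons x rest ih =>
    by_cases hm : x ∈ s
    · have h2 : PySem.Set.update s (x :: rest) = PySem.Set.update s rest := by
        simp [PySem.Set.update, PySem.Set.add, hm]
      rw [List.foldl_cons, h2]
      simpa [hm] using ih s
    · have h2 : PySem.Set.update s (x :: rest) = PySem.Set.update (s ++ [x]) rest := by
        simp [PySem.Set.update, PySem.Set.add, hm]
      rw [List.foldl_cons, h2]
      simpa [hm] using ih (s ++ [x])

theorem update_append (s : PySem.Set String) (a b : List String) :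
    PySem.Set.update s (a ++ b) = PySem.Set.update (PySem.Set.update s a) b := by
  simp [PySem.Set.update, List.foldl_append]

theorem loopA_eq (supported : List String) (vs : List String) (s : PySem.Set String)
    (h : ∀ raw ∈ vs, pvNorm raw = "all" ∨ pvNorm raw ∈ supported) :
    loopA supported vs (s, s)
      = some (PySem.Set.update s (flatE supported vs),
              PySem.Set.update s (flatE supported vs)) := by
  induction vs generalizing s with
  | nil => simp [loopA, flatE, PySem.Set.update]
  | cons raw rest ih =>
    have hr := h raw (by simp)
    have hrest : ∀ r ∈ rest, pvNorm r = "all" ∨ pvNorm r ∈ supported :=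
      fun r hm => h r (by simp [hm])
    by_cases hall : pvNorm raw = "all"
    · rw [loopA,
        show flatE supported (raw :: rest) = supported ++ flatE supported rest from by
          simp [flatE, hall],
        update_append]
      simpa [hall, foldl_all_pair] using ih (PySem.Set.update s supported) hrest
    · rcases hr with hr | hr
      · exact absurd hr hall
      · have hstep : PySem.Set.update s (flatE supported (raw :: rest))
            = PySem.Set.update (PySem.Set.add s (pvNorm raw)) (flatE supported rest) := by
          simp only [flatE, if_neg hall, List.singleton_append, PySem.Set.update,
            List.foldl_cons]
        rw [loopA, hstep]
        by_cases hm : pvNorm raw ∈ s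
        · have hadd : PySem.Set.add s (pvNorm raw) = s := by
            simp [PySem.Set.add, hm]
          rw [hadd]
          simpa [hall, hr, hm] using ih s hrest
        · have hadd : PySem.Set.add s (pvNorm raw) = s ++ [pvNorm raw] := by
            simp [PySem.Set.add, hm]
          rw [hadd]
          simpa [hall, hr, hm] using ih (s ++ [pvNorm raw]) hrest

-- ===== VERDICT (by name: the statement is the Claim_ definition above) =====
theorem resolve_format_list_spec : Claim_equal_resolve_format_list := by
  intro values supported _ hpre
  unfold Spec_resolve_format_list resolve_format_list resolve_format_list_alt
  match values with
  | none => rfl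
  | some vs =>
    by_cases hnil : vs = []
    · simp [hnil]
    · have hp : ∀ raw ∈ vs, pvNorm raw = "all" ∨ pvNorm raw ∈ supported := by
        simpa [Pre_resolve_format_list] using hpre
      have hA := loopA_eq supported vs [] hp
      simp only [if_neg hnil, zip_all_valid supported vs hp, if_pos, flatMap_eq_flatE,
        sorted_idx_ofList]
      rw [show (PySem.Set.empty : PySem.Set String) = ([] : List String) from rfl, hA]
      simp [PySem.Set.ofList, PySem.Set.update]
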